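-- pv_equiv track=rewrite | github.com/mwisnowski/mtg_python_deckbuilder | code/deck_builder/color_identity_utils.py | normalize_colors
-- ===== SOURCE A (Python) =====
-- from typing import Iterable, List
--
-- _WUBRG_ORDER: tuple[str, ...] = ("W", "U", "B", "R", "G")
--
-- _VALID_COLORS: frozenset[str] = frozenset((*_WUBRG_ORDER, "C"))
--
-- def _extract_tokens(identity: Iterable[str] | str | None) -> List[str]:
--     if identity is None:
--         return []
--     tokens: list[str] = []
--     if isinstance(identity, str):
--         identity_iter: Iterable[str] = (identity,)
--     else:
--         identity_iter = identity
--     for item in identity_iter: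
--         if item is None:
--             continue
--         text = str(item).strip().upper()
--         if not text:
--             continue
--         if len(text) > 1 and text.isalpha():
--             for ch in text:
--                 if ch in _VALID_COLORS:
--                     tokens.append(ch)
--         else:
--             for ch in text:
--                 if ch in _VALID_COLORS:
--                     tokens.append(ch)
--     return tokens
--
-- def normalize_colors(identity: Iterable[str] | str | None) -> list[str]:
--     tokens = _extract_tokens(identity)
--     if not tokens:
--         return []
--     seen: set[str] = set()
--     collected: list[str] = []
--     for token in tokens:
--         if token in _WUBRG_ORDER and token not in seen:
--             seen.add(token)
--             collected.append(token)
--     return [color for color in _WUBRG_ORDER if color in seen]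
-- ===== SOURCE B (Python) =====
-- from typing import Iterable
--
-- _WUBRG_ORDER: tuple[str, ...] = ("W", "U", "B", "R", "G")
--
-- def normalize_colors(identity: "Iterable[str] | str | None") -> list:
--     if identity is None:
--         items = []
--     elif isinstance(identity, str):
--         items = [identity]
--     else:
--         items = list(identity)
--     blob = "".join(str(item).strip().upper() for item in items if item is not None)
--     return [c for c in _WUBRG_ORDER if c in blob]
-- ===== Notes on version B (the rewrite author's own statement) =====
-- stated objective: simpler
-- what changed: B inverts the loop nesting: instead of A's per-character token-extraction pass plus a seen-set dedup pass plus an ordered filter, B joins the stripped/uppercased items into one blob and returns the five WUBRG colors that occur in it, dropping the token list, the seen set and the dead duplicated branch; the per-character Python-level loops become five C-level substring searches, a constant-factor speedup.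
import Mathlib
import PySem

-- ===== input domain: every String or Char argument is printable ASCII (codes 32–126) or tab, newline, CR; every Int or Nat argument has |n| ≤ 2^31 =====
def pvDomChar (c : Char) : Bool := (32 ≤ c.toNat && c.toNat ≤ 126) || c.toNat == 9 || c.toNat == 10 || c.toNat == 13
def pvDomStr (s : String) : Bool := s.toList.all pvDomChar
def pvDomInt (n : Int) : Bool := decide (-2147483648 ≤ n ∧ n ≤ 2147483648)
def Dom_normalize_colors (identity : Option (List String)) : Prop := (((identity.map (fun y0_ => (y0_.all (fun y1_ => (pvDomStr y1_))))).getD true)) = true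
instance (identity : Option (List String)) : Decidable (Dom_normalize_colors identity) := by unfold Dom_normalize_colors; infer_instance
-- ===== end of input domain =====

-- B joins the stripped/uppercased items into one blob and keeps each WUBRG color that occurs in it,
-- replacing A's token list / seen set / ordered-filter pipeline; objective: simpler.
-- Single-character Python strings (the color tokens) are represented as Char in both ports,
-- converted back to String only in the final result.

-- ===== PORT A =====
def pvWUBRGChars : List Char := ['W', 'U', 'B', 'R', 'G']
def pvValidChars : List Char := ['W', 'U', 'B', 'R', 'G', 'C']

-- _extract_tokens (identity is never a bare str under the Lean type; the str branch is vacuous)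
def pvExtractTokens (identity : Option (List String)) : List Char :=
  match identity with
  | none => []
  | some items =>
    items.foldl (fun tokens item =>
      let text := (PySem.Str.upper (PySem.Str.strip item)).toList
      if text = [] then tokens
      else if 1 < text.length ∧ PySem.Chars.strIsalpha text then
        text.foldl (fun tks ch => if ch ∈ pvValidChars then tks ++ [ch] else tks) tokens
      else
        text.foldl (fun tks ch => if ch ∈ pvValidChars then tks ++ [ch] else tks) tokens) []

def normalize_colors (identity : Option (List String)) : List String :=
  let tokens := pvExtractTokens identity
  if tokens = [] then []
  else
    let st := tokens.foldl (fun (st : PySem.Set Char × List Char) token =>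
        if token ∈ pvWUBRGChars ∧ token ∉ st.1 then (st.1.add token, st.2 ++ [token]) else st)
      (PySem.Set.ofList [], [])
    (pvWUBRGChars.filter (fun color => color ∈ st.1)).map (fun c => String.ofList [c])

-- ===== PORT B =====
def normalize_colors_alt (identity : Option (List String)) : List String :=
  let items := match identity with | none => [] | some l => l
  -- "".join(str(item).strip().upper() for item in items if item is not None)  (items are never None here)
  let blob := (items.map (fun item => PySem.Chars.upper (PySem.Chars.strip item.toList))).flatten
  -- [c for c in _WUBRG_ORDER if c in blob]; 'c in blob' for a 1-char c is char membership
  ((['W', 'U', 'B', 'R', 'G'] : List Char).filter (fun c => c ∈ blob)).map (fun c => String.ofList [c])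

-- ===== PRECONDITION & SPEC =====
def Spec_normalize_colors (identity : Option (List String)) (out : List String) : Prop := out = normalize_colors_alt identity
instance (identity : Option (List String)) (out : List String) : Decidable (Spec_normalize_colors identity out) := by unfold Spec_normalize_colors; infer_instance

-- ===== CLAIM (what is proved, stated in full; the proofs are below) =====
def Claim_equal_normalize_colors : Prop := ∀ (identity : Option (List String)), Dom_normalize_colors identity → Spec_normalize_colors identity (normalize_colors identity)

-- ===== LEMMAS AND PROOFS =====

-- one item's inner char loop appends exactly the valid colors of the text
theorem pv_inner_loop (text : List Char) (acc : List Char) :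
    text.foldl (fun tks ch => if ch ∈ pvValidChars then tks ++ [ch] else tks) acc
      = acc ++ text.filter (fun ch => decide (ch ∈ pvValidChars)) := by
  induction text generalizing acc with
  | nil => simp
  | cons c cs ih =>
    simp only [List.foldl_cons, List.filter_cons]
    by_cases h : c ∈ pvValidChars
    · simp [h, ih]
    · simp [h, ih]

-- the token list is the valid-color filter of the concatenated texts
theorem pv_extract_eq (items : List String) (acc : List Char) :
    items.foldl (fun tokens item =>
      let text := (PySem.Str.upper (PySem.Str.strip item)).toList
      if text = [] then tokens
      else if 1 < text.length ∧ PySem.Chars.strIsalpha text then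
        text.foldl (fun tks ch => if ch ∈ pvValidChars then tks ++ [ch] else tks) tokens
      else
        text.foldl (fun tks ch => if ch ∈ pvValidChars then tks ++ [ch] else tks) tokens) acc
    = acc ++ ((items.map (fun item => PySem.Chars.upper (PySem.Chars.strip item.toList))).flatten).filter
        (fun ch => decide (ch ∈ pvValidChars)) := by
  induction items generalizing acc with
  | nil => simp
  | cons s ss ih =>
    simp only [List.foldl_cons, List.map_cons, List.flatten_cons, List.filter_append]
    have htext : (PySem.Str.upper (PySem.Str.strip s)).toList
        = PySem.Chars.upper (PySem.Chars.strip s.toList) := by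
      simp [pysem]
    by_cases hnil : (PySem.Str.upper (PySem.Str.strip s)).toList = []
    · simp only [hnil, ih]
      rw [← htext, hnil]
      simp
    · rw [if_neg hnil]
      by_cases hbr : 1 < (PySem.Str.upper (PySem.Str.strip s)).toList.length ∧
          PySem.Chars.strIsalpha (PySem.Str.upper (PySem.Str.strip s)).toList
      · rw [if_pos hbr, ih, pv_inner_loop, htext, List.append_assoc]
      · rw [if_neg hbr, ih, pv_inner_loop, htext, List.append_assoc]

-- membership in the seen set after A's dedup fold
theorem pv_seen_mem (tokens : List Char) (st : PySem.Set Char × List Char) (c : Char) :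
    (c ∈ (tokens.foldl (fun (st : PySem.Set Char × List Char) token =>
        if token ∈ pvWUBRGChars ∧ token ∉ st.1 then (st.1.add token, st.2 ++ [token]) else st) st).1)
      ↔ (c ∈ st.1 ∨ (c ∈ tokens ∧ c ∈ pvWUBRGChars)) := by
  induction tokens generalizing st with
  | nil => simp
  | cons t ts ih =>
    simp only [List.foldl_cons]
    by_cases h : t ∈ pvWUBRGChars ∧ t ∉ st.1
    · rw [if_pos h, ih]
      simp only [PySem.Set.mem_add, List.mem_cons]
      constructor
      · rintro (⟨hc | hc⟩ | hc)
        · exact Or.inl hc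
        · exact Or.inr ⟨Or.inl hc, hc ▸ h.1⟩
        · exact Or.inr ⟨Or.inr hc.1, hc.2⟩
      · rintro (hc | ⟨(hc | hc), hw⟩)
        · exact Or.inl (Or.inl hc)
        · exact Or.inl (Or.inr hc)
        · exact Or.inr ⟨hc, hw⟩
    · rw [if_neg h, ih]
      constructor
      · rintro (hc | hc)
        · exact Or.inl hc
        · exact Or.inr ⟨List.mem_cons_of_mem _ hc.1, hc.2⟩
      · rintro (hc | ⟨hc, hw⟩)
        · exact Or.inl hc
        · rcases List.mem_cons.mp hc with hc | hc
          · subst hc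
            rcases not_and_or.mp h with h' | h'
            · exact absurd hw h'
            · exact Or.inl (not_not.mp h')
          · exact Or.inr ⟨hc, hw⟩

-- the tail of A (emptiness guard + dedup fold + ordered filter) agrees with B's blob filter
theorem pv_final (blob tokens : List Char)
    (h : tokens = blob.filter (fun ch => decide (ch ∈ pvValidChars))) :
    (if tokens = [] then ([] : List String)
     else (pvWUBRGChars.filter (fun color => decide (color ∈
        (tokens.foldl (fun (st : PySem.Set Char × List Char) token =>
          if token ∈ pvWUBRGChars ∧ token ∉ st.1 then (st.1.add token, st.2 ++ [token]) else st)
          (PySem.Set.ofList [], [])).1))).map (fun c => String.ofList [c]))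
    = ((['W', 'U', 'B', 'R', 'G'] : List Char).filter (fun c => decide (c ∈ blob))).map
        (fun c => String.ofList [c]) := by
  have hmemtok : ∀ c : Char, c ∈ pvWUBRGChars → (c ∈ tokens ↔ c ∈ blob) := by
    intro c hc
    rw [h, List.mem_filter]
    constructor
    · exact fun hx => hx.1
    · intro hx
      refine ⟨hx, ?_⟩
      fin_cases hc <;> decide
  have hfilters : pvWUBRGChars.filter (fun c => decide (c ∈
      (tokens.foldl (fun (st : PySem.Set Char × List Char) token =>
        if token ∈ pvWUBRGChars ∧ token ∉ st.1 then (st.1.add token, st.2 ++ [token]) else st)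
        (PySem.Set.ofList [], [])).1))
      = pvWUBRGChars.filter (fun c => decide (c ∈ blob)) := by
    apply List.filter_congr
    intro c hc
    simp only [decide_eq_decide]
    rw [pv_seen_mem]
    simp only [PySem.Set.mem_ofList, List.not_mem_nil, false_or]
    constructor
    · exact fun hx => (hmemtok c hc).mp hx.1
    · exact fun hx => ⟨(hmemtok c hc).mpr hx, hc⟩
  by_cases hnil : tokens = []
  · rw [if_pos hnil]
    have hempty : pvWUBRGChars.filter (fun c => decide (c ∈ blob)) = [] := by
      rw [← hfilters, hnil]
      decide
    rw [show (['W', 'U', 'B', 'R', 'G'] : List Char) = pvWUBRGChars from rfl, hempty]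
    rfl
  · rw [if_neg hnil, hfilters]
    rfl

theorem normalize_colors_eq (identity : Option (List String)) :
    normalize_colors identity = normalize_colors_alt identity := by
  match identity with
  | none => rfl
  | some items =>
    unfold normalize_colors normalize_colors_alt pvExtractTokens
    exact pv_final _ _ (by
      simpa [List.filter_flatten, List.map_map] using pv_extract_eq items [])

-- ===== VERDICT (by name: the statement is the Claim_ definition above) =====
theorem normalize_colors_spec : Claim_equal_normalize_colors := by
  intro identity _
  exact normalize_colors_eq identity
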